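-- pv_equiv track=rewrite | github.com/streetms/PainAnalyzer | build_apk.py | pick_apk_target
-- ===== SOURCE A (Python) =====
-- def pick_apk_target(project_name: str, targets: list[str]) -> str:
--     preferred = [
--         f"{project_name}_make_apk",
--         "apk_all",
--         "apk",
--     ]
--     for t in preferred:
--         if t in targets:
--             return t
--     return ""
-- ===== SOURCE B (Python) =====
-- def pick_apk_target(project_name: str, targets: list[str]) -> str:
--     rank = {f"{project_name}_make_apk": 0, "apk_all": 1, "apk": 2}
--     best = None
--     for t in targets:
--         r = rank.get(t)
--         if r is not None and (best is None or r < best[0]):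
--             best = (r, t)
--     return best[1] if best is not None else ""
-- ===== Notes on version B (the rewrite author's own statement) =====
-- stated objective: alternative
-- what changed: Instead of testing each preferred name for membership in targets (3 list scans), B builds a rank dict of the preferred names and makes one pass over targets keeping the target of minimum rank.
import Mathlib
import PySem

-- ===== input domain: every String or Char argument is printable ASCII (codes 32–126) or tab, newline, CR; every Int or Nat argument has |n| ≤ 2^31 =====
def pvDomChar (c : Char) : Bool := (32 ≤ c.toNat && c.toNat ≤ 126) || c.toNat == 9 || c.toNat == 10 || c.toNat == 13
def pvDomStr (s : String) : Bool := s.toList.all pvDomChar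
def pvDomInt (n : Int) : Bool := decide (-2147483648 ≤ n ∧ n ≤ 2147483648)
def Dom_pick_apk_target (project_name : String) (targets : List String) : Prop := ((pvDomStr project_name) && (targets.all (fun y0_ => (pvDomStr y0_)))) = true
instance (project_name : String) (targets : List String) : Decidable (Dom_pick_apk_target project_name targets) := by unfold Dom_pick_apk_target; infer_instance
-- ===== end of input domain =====

-- B replaces A's ordered membership tests over the preferred list by a rank dict and
-- a single minimum-rank scan of `targets` (alternative decomposition, same cost class).

-- ===== PORT A =====
-- the 'for t in preferred: if t in targets: return t' loop, as structural recursion on preferred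
def pickA_go (preferred : List String) (targets : List String) : String :=
  match preferred with
  | [] => ""
  | t :: rest => if targets.contains t then t else pickA_go rest targets

def pick_apk_target (project_name : String) (targets : List String) : String :=
  let preferred := [project_name ++ "_make_apk", "apk_all", "apk"]
  pickA_go preferred targets

-- ===== PORT B =====
-- the 'for t in targets: …' loop of Source B, carrying best : Option (rank, target)
def pickB_go (rank : PySem.Dict String Int) (targets : List String)
    (best : Option (Int × String)) : Option (Int × String) :=
  match targets with
  | [] => best
  | t :: rest =>
    let best' :=
      match rank.get? t, best with
      | some r, none => some (r, t)
      | some r, some (br, bt) => if r < br then some (r, t) else some (br, bt)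
      | none, b => b
    pickB_go rank rest best'

def pick_apk_target_alt (project_name : String) (targets : List String) : String :=
  let rank : PySem.Dict String Int :=
    ((PySem.Dict.empty.insert (project_name ++ "_make_apk") 0).insert "apk_all" 1).insert "apk" 2
  match pickB_go rank targets none with
  | some (_, t) => t
  | none => ""

-- ===== PRECONDITION & SPEC =====
def Spec_pick_apk_target (project_name : String) (targets : List String) (out : String) : Prop := out = pick_apk_target_alt project_name targets
instance (project_name : String) (targets : List String) (out : String) : Decidable (Spec_pick_apk_target project_name targets out) := by unfold Spec_pick_apk_target; infer_instance

-- ===== CLAIM (what is proved, stated in full; the proofs are below) =====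
def Claim_equal_pick_apk_target : Prop := ∀ (project_name : String) (targets : List String), Dom_pick_apk_target project_name targets → Spec_pick_apk_target project_name targets (pick_apk_target project_name targets)

-- ===== LEMMAS AND PROOFS =====

theorem p0_ne_apk_all (pn : String) : pn ++ "_make_apk" ≠ "apk_all" := by
  intro h
  have := congrArg String.length h
  simp [String.length_append, show ("_make_apk" : String).length = 9 from rfl,
        show ("apk_all" : String).length = 7 from rfl] at this

theorem p0_ne_apk (pn : String) : pn ++ "_make_apk" ≠ "apk" := by
  intro h
  have := congrArg String.length h
  simp [String.length_append, show ("_make_apk" : String).length = 9 from rfl,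
        show ("apk" : String).length = 3 from rfl] at this

theorem rank_get? (pn t : String) :
    (((PySem.Dict.empty.insert (pn ++ "_make_apk") (0:Int)).insert "apk_all" 1).insert "apk" 2).get? t
    = if t = "apk" then some 2 else if t = "apk_all" then some 1
      else if t = pn ++ "_make_apk" then some 0 else none := by
  simp [PySem.Dict.get?_insert, PySem.Dict.get?_empty]

-- characterization of B's loop from any reachable accumulator state
theorem pickB_go_char (pn : String) (ts : List String) (best : Option (Int × String))
    (hbest : best = none ∨ best = some (0, pn ++ "_make_apk") ∨
             best = some (1, "apk_all") ∨ best = some (2, "apk")) :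
    pickB_go (((PySem.Dict.empty.insert (pn ++ "_make_apk") 0).insert "apk_all" 1).insert "apk" 2) ts best
    = if pn ++ "_make_apk" ∈ ts ∨ best = some (0, pn ++ "_make_apk") then some (0, pn ++ "_make_apk")
      else if "apk_all" ∈ ts ∨ best = some (1, "apk_all") then some (1, "apk_all")
      else if "apk" ∈ ts ∨ best = some (2, "apk") then some (2, "apk")
      else none := by
  induction ts generalizing best with
  | nil =>
    rcases hbest with h | h | h | h <;> subst h <;> simp [pickB_go]
  | cons t rest ih =>
    by_cases h0 : t = pn ++ "_make_apk"
    · subst h0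
      rcases hbest with h | h | h | h <;> subst h <;>
        simp [pickB_go, rank_get?, p0_ne_apk_all pn, p0_ne_apk pn,
              ih _ (Or.inr (Or.inl rfl)), List.mem_cons]
    · by_cases h1 : t = "apk_all"
      · subst h1
        rcases hbest with h | h | h | h <;> subst h <;>
          simp [pickB_go, rank_get?, p0_ne_apk_all pn, (p0_ne_apk_all pn).symm, List.mem_cons,
                ih _ (Or.inr (Or.inr (Or.inl rfl))), ih _ (Or.inr (Or.inl rfl))]
      · by_cases h2 : t = "apk"
        · subst h2
          rcases hbest with h | h | h | h <;> subst h <;>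
            simp [pickB_go, p0_ne_apk pn, (p0_ne_apk pn).symm, List.mem_cons,
                  ih _ (Or.inr (Or.inr (Or.inr rfl))), ih _ (Or.inr (Or.inl rfl)),
                  ih _ (Or.inr (Or.inr (Or.inl rfl)))]
        · have hne0 : pn ++ "_make_apk" ≠ t := fun h => h0 h.symm
          have hne1 : "apk_all" ≠ t := fun h => h1 h.symm
          have hne2 : "apk" ≠ t := fun h => h2 h.symm
          rcases hbest with h | h | h | h <;> subst h <;>
            simp [pickB_go, rank_get?, h0, h1, h2, hne0, hne1, hne2, List.mem_cons,
                  ih _ (Or.inl rfl), ih _ (Or.inr (Or.inl rfl)),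
                  ih _ (Or.inr (Or.inr (Or.inl rfl))), ih _ (Or.inr (Or.inr (Or.inr rfl)))]

-- ===== VERDICT (by name: the statement is the Claim_ definition above) =====
theorem pick_apk_target_spec : Claim_equal_pick_apk_target := by
  intro pn ts _
  unfold Spec_pick_apk_target
  simp only [pick_apk_target, pick_apk_target_alt]
  rw [pickB_go_char pn ts none (Or.inl rfl)]
  simp only [pickA_go, List.contains_iff_mem]
  by_cases h0 : pn ++ "_make_apk" ∈ ts <;>
  by_cases h1 : "apk_all" ∈ ts <;>
  by_cases h2 : "apk" ∈ ts <;>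
    simp [h0, h1, h2]
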